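-- pv_equiv track=rewrite | github.com/jeongYuri/coding-test-solution | 백준/Silver/3085. 사탕 게임/사탕 게임.py | cnt_candy
-- ===== SOURCE A (Python) =====
-- def cnt_candy(candy, n):
--     max_candy = 0
--     for i in range(n):
--         row_cnt = 1
--         for j in range(1,n):
--             if candy[i][j] == candy[i][j-1]:
--                 row_cnt+=1
--             else:
--                 max_candy = max(max_candy,row_cnt)
--                 row_cnt =1
--         max_candy = max(max_candy,row_cnt)
--     for j in range(n):
--         col_cnt = 1
--         for i in range(1,n):
--             if candy[i][j]== candy[i-1][j]:
--                 col_cnt+=1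
--             else:
--                 max_candy = max(max_candy, col_cnt)
--                 col_cnt =1
--         max_candy = max(max_candy,col_cnt)
--     return max_candy
-- ===== SOURCE B (Python) =====
-- def _max_run(line):
--     # breakpoint positions where the value changes, then the widest gap
--     bounds = [0] + [i for i in range(1, len(line)) if line[i] != line[i - 1]] + [len(line)]
--     return max(b - a for a, b in zip(bounds, bounds[1:]))
--
--
-- def cnt_candy(candy, n):
--     m = max(n, 0)
--     grid = [row[:m] for row in candy[:m]]
--     lines = grid + [list(col) for col in zip(*grid)]
--     return max((_max_run(line) for line in lines), default=0)
-- ===== Notes on version B (the rewrite author's own statement) =====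
-- stated objective: alternative
-- what changed: Replaces A's four index-driven run-counting loops (manual counter/reset per row and per column) by a breakpoint formulation: slice out the n-by-n block, transpose it with zip, and for each line take the widest gap between positions where adjacent cells differ.
-- intended difference: When n = 1 but the grid has no cell (candy empty, or its first row empty), A returns 1 without ever reading the grid while B returns 0; 0 is the intended value since the sliced 1x1 block holds no candy at all. — e.g. on cnt_candy([], 1): A returns 1, B returns 0
import Mathlib
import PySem

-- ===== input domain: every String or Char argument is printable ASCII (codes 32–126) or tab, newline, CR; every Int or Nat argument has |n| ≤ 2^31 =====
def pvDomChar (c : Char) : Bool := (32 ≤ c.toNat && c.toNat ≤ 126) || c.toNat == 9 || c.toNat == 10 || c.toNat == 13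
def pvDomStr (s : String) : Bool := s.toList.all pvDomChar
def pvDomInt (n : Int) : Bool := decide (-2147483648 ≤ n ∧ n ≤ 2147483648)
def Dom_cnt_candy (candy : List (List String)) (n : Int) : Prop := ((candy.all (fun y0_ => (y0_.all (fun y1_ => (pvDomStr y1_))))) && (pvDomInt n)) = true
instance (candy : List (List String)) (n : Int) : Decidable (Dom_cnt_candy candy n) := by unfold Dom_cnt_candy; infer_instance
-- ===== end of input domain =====

-- B replaces A's four index-driven run-counting loops by a breakpoint formulation: slice the n×n
-- block, transpose with zip, and per line take the widest gap between change positions (objective: alternative).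

-- ===== PORT A =====
-- candy[i][j] as an Option (none = IndexError); Pre_ keeps every access in range
def pvCell (candy : List (List String)) (i j : Int) : Option String :=
  (PySem.List.pyGet? candy i).bind (fun row => PySem.List.pyGet? row j)

def cnt_candy (candy : List (List String)) (n : Int) : Int :=
  let afterRows :=
    (PySem.List.pyRange 0 n 1).foldl
      (fun max_candy i =>
        let p :=
          (PySem.List.pyRange 1 n 1).foldl
            (fun (s : Int × Int) j =>
              if pvCell candy i j == pvCell candy i (j - 1) then (s.1, s.2 + 1)
              else (max s.1 s.2, 1))
            (max_candy, 1)
        max p.1 p.2)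
      0
  (PySem.List.pyRange 0 n 1).foldl
    (fun max_candy j =>
      let p :=
        (PySem.List.pyRange 1 n 1).foldl
          (fun (s : Int × Int) i =>
            if pvCell candy i j == pvCell candy (i - 1) j then (s.1, s.2 + 1)
            else (max s.1 s.2, 1))
          (max_candy, 1)
      max p.1 p.2)
    afterRows

-- ===== PORT B =====
-- widest gap between the positions where adjacent entries differ (Source B's _max_run)
def pvMaxRun (line : List String) : Int :=
  let len : Int := (line.length : Int)
  let cuts := (PySem.List.pyRange 1 len 1).filter
      (fun i => !(PySem.List.pyGet? line i == PySem.List.pyGet? line (i - 1)))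
  let bounds := (0 : Int) :: (cuts ++ [len])
  let diffs := (bounds.zip bounds.tail).map (fun p => p.2 - p.1)
  match diffs with
  | [] => 0          -- unreachable: bounds always has at least two entries
  | d :: ds => ds.foldl max d

def cnt_candy_alt (candy : List (List String)) (n : Int) : Int :=
  let m : Int := max n 0
  let grid := (PySem.List.slice candy none (some m)).map
      (fun row => PySem.List.slice row none (some m))
  -- zip(*grid): one column per index below the shortest row; no columns for an empty grid
  let cols := (List.range (((grid.map List.length).min?).getD 0)).map
      (fun j => grid.map (fun row => row.getD j ""))
  let lines := grid ++ cols
  match lines.map pvMaxRun with   -- max(..., default=0)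
  | [] => 0
  | v :: vs => vs.foldl max v

-- ===== PRECONDITION & SPEC =====
-- Pre_ excludes exactly the inputs where A raises IndexError: n ≥ 2 without a full n×n block
-- (A reads candy[i][j] for all i < n, j < n there).
def Pre_cnt_candy (candy : List (List String)) (n : Int) : Prop :=
  n ≤ 1 ∨ (n ≤ (candy.length : Int) ∧ ∀ row ∈ candy.take n.toNat, n ≤ (row.length : Int))
instance (candy : List (List String)) (n : Int) : Decidable (Pre_cnt_candy candy n) := by
  unfold Pre_cnt_candy; infer_instance

def pvWitness_cnt_candy : List (List String) × Int := ([[ "a", "a" ], [ "a", "b" ]], 2)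

-- When n = 1 but the grid has no cell (no row, or an empty first row), A returns 1 without ever
-- reading the grid (its loops never index), while B returns 0; 0 is the intended value since the
-- sliced 1×1 block holds no candy at all.
def D_cnt_candy (candy : List (List String)) (n : Int) : Prop :=
  n = 1 ∧ (candy.head?.getD []) = []
instance (candy : List (List String)) (n : Int) : Decidable (D_cnt_candy candy n) := by
  unfold D_cnt_candy; infer_instance

def Spec_cnt_candy (candy : List (List String)) (n : Int) (out : Int) : Prop :=
  ¬ D_cnt_candy candy n → out = cnt_candy_alt candy n
instance (candy : List (List String)) (n : Int) (out : Int) : Decidable (Spec_cnt_candy candy n out) := by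
  unfold Spec_cnt_candy; infer_instance

def pvDiffWitness_cnt_candy : List (List String) × Int := ([], 1)
def pvDiffWitnessOut_cnt_candy : Int × Int := (1, 0)

-- ===== CLAIM (what is proved, stated in full; the proofs are below) =====
def Claim_unchanged_cnt_candy : Prop := ∀ (candy : List (List String)) (n : Int), Dom_cnt_candy candy n → Pre_cnt_candy candy n → Spec_cnt_candy candy n (cnt_candy candy n)
def Claim_changed_cnt_candy : Prop := Dom_cnt_candy (pvDiffWitness_cnt_candy.1) (pvDiffWitness_cnt_candy.2) ∧ Pre_cnt_candy (pvDiffWitness_cnt_candy.1) (pvDiffWitness_cnt_candy.2) ∧ D_cnt_candy (pvDiffWitness_cnt_candy.1) (pvDiffWitness_cnt_candy.2) ∧ cnt_candy (pvDiffWitness_cnt_candy.1) (pvDiffWitness_cnt_candy.2) = pvDiffWitnessOut_cnt_candy.1 ∧ cnt_candy_alt (pvDiffWitness_cnt_candy.1) (pvDiffWitness_cnt_candy.2) = pvDiffWitnessOut_cnt_candy.2 ∧ pvDiffWitnessOut_cnt_candy.1 ≠ pvDiffWitnessOut_cnt_candy.2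
def Claim_exact_cnt_candy : Prop := ∀ (candy : List (List String)) (n : Int), Dom_cnt_candy candy n → Pre_cnt_candy candy n → D_cnt_candy candy n → cnt_candy candy n ≠ cnt_candy_alt candy n

-- ===== LEMMAS AND PROOFS =====

-- step of A's run-counting scans, abstracted over the comparison outcome
def pvStep (s : Int × Int) (b : Bool) : Int × Int :=
  if b then (s.1, s.2 + 1) else (max s.1 s.2, 1)

-- reference value: longest run, from the list of adjacent-equality booleans, current run length rc
def pvBest (rc : Int) : List Bool → Int
  | [] => rc
  | true :: bs => pvBest (rc + 1) bs
  | false :: bs => max rc (pvBest 1 bs)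

-- adjacent-equality booleans of a line
def pvBools (line : List String) : List Bool :=
  (List.range (line.length - 1)).map
    (fun (k : Nat) => PySem.List.pyGet? line ((k : Int) + 1) == PySem.List.pyGet? line ((k : Nat) : Int))

-- cut positions (first position of each new run, except position 0), bs starting at position p
def pvCuts : List Bool → Int → List Int
  | [], _ => []
  | true :: bs, p => pvCuts bs (p + 1)
  | false :: bs, p => p :: pvCuts bs (p + 1)

-- widest gap of a bounds chain starting at a
def pvChain (a : Int) : List Int → Int
  | [] => 0
  | [b] => b - a
  | b :: rest => max (b - a) (pvChain b rest)

theorem pvBest_ge (bs : List Bool) (rc : Int) : rc ≤ pvBest rc bs := by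
  induction bs generalizing rc with
  | nil => simp [pvBest]
  | cons b bs ih =>
    cases b with
    | true => simpa [pvBest] using le_trans (by omega) (ih (rc + 1))
    | false => simp only [pvBest]; exact le_max_left _ _

theorem pvStep_fold (bs : List Bool) (mc rc : Int) :
    max (bs.foldl pvStep (mc, rc)).1 (bs.foldl pvStep (mc, rc)).2 = max mc (pvBest rc bs) := by
  induction bs generalizing mc rc with
  | nil => simp [pvBest]
  | cons b bs ih =>
    cases b with
    | true => simpa [pvStep, pvBest] using ih mc (rc + 1)
    | false =>
      rw [List.foldl_cons, show pvStep (mc, rc) false = (max mc rc, 1) from rfl, ih,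
        show pvBest rc (false :: bs) = max rc (pvBest 1 bs) from rfl, max_assoc]

theorem pvCuts_filter (bs : List Bool) (p : Int) (pred : Int → Bool)
    (h : ∀ k : Nat, (hk : k < bs.length) → pred (p + k) = !bs[k]) :
    (PySem.List.pyRange p (p + bs.length) 1).filter pred = pvCuts bs p := by
  induction bs generalizing p with
  | nil =>
    rw [show p + ((List.length ([] : List Bool) : Nat) : Int) = p by simp]
    simp [pvCuts, PySem.List.pyRange_one_eq_nil (le_refl p)]
  | cons b bs ih =>
    have hend : p + (((b :: bs).length : Nat) : Int) = (p + 1) + (bs.length : Int) := by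
      simp; ring
    have hcons : PySem.List.pyRange p (p + (((b :: bs).length : Nat) : Int)) 1
        = p :: PySem.List.pyRange (p + 1) (p + (((b :: bs).length : Nat) : Int)) 1 :=
      PySem.List.pyRange_one_cons (by push_cast [List.length_cons]; omega)
    have hp0 : pred p = !b := by simpa using h 0 (by simp)
    have hih : (PySem.List.pyRange (p + 1) ((p + 1) + (bs.length : Int)) 1).filter pred
        = pvCuts bs (p + 1) := by
      apply ih
      intro k hk
      have e : (p + 1) + (k : Int) = p + ((k + 1 : Nat) : Int) := by push_cast; ring
      rw [e]
      simpa using h (k + 1) (by simp; omega)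
    cases b with
    | true =>
      rw [hcons, List.filter_cons_of_neg (by simp [hp0]), hend, hih]
      rfl
    | false =>
      rw [hcons, List.filter_cons_of_pos (by simp [hp0]), hend, hih]
      rfl

theorem pvChain_cons₂ (a b : Int) (rest : List Int) (h : rest ≠ []) :
    pvChain a (b :: rest) = max (b - a) (pvChain b rest) := by
  cases rest with
  | nil => exact absurd rfl h
  | cons c t => rfl

theorem pvChain_cuts (bs : List Bool) (prev p : Int) :
    pvChain prev (pvCuts bs p ++ [p + bs.length]) = pvBest (p - prev) bs := by
  induction bs generalizing prev p with
  | nil => simp [pvCuts, pvBest, pvChain]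
  | cons b bs ih =>
    have hend : p + (((b :: bs).length : Nat) : Int) = (p + 1) + (bs.length : Int) := by
      simp; ring
    cases b with
    | true =>
      show pvChain prev (pvCuts bs (p + 1) ++ [p + (((true :: bs).length : Nat) : Int)])
          = pvBest (p - prev) (true :: bs)
      rw [hend, ih]
      have e : p + 1 - prev = (p - prev) + 1 := by ring
      rw [e]; rfl
    | false =>
      show pvChain prev (p :: (pvCuts bs (p + 1) ++ [p + (((false :: bs).length : Nat) : Int)]))
          = pvBest (p - prev) (false :: bs)
      rw [pvChain_cons₂ _ _ _ (by simp), hend, ih]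
      have e : p + 1 - p = (1 : Int) := by ring
      rw [e]; rfl

theorem pvChain_fold (a : Int) (rest : List Int) (h : rest ≠ []) :
    (match ((a :: rest).zip rest).map (fun p => p.2 - p.1) with
      | [] => (0 : Int)
      | d :: ds => ds.foldl max d) = pvChain a rest := by
  induction rest generalizing a with
  | nil => exact absurd rfl h
  | cons b t ih =>
    cases t with
    | nil => simp [pvChain]
    | cons c t' =>
      have ihb := ih (a := b) (by simp)
      simp only [List.zip_cons_cons, List.map_cons, List.foldl_cons] at ihb ⊢
      rw [List.foldl_assoc (op := max)]
      rw [ihb]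
      rw [pvChain_cons₂ a b (c :: t') (by simp)]

theorem pvMin?_replicate (k a : Nat) : (List.replicate (k + 1) a).min? = some a := by
  induction k with
  | zero => simp [List.min?]
  | succ k ih => rw [List.replicate_succ, List.min?_cons, ih]; simp

theorem pvMaxRun_eq (line : List String) (h : line ≠ []) :
    pvMaxRun line = pvBest 1 (pvBools line) := by
  have hL : 1 ≤ line.length := List.length_pos_of_ne_nil h
  have hlen : (pvBools line).length = line.length - 1 := by simp [pvBools]
  have e : (line.length : Int) = 1 + ((pvBools line).length : Int) := by rw [hlen]; omega
  have hcuts : (PySem.List.pyRange 1 (line.length : Int) 1).filter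
      (fun i => !(PySem.List.pyGet? line i == PySem.List.pyGet? line (i - 1)))
      = pvCuts (pvBools line) 1 := by
    rw [e]
    apply pvCuts_filter
    intro k hk
    have hk' : k < line.length - 1 := by omega
    have e1 : (1 : Int) + (k : Int) - 1 = (k : Int) := by ring
    have e2 : (1 : Int) + (k : Int) = ((k : Int) + 1) := by ring
    show (!(PySem.List.pyGet? line (1 + (k : Int)) == PySem.List.pyGet? line (1 + (k : Int) - 1)))
        = !(pvBools line)[k]
    rw [e1, e2]
    simp only [pvBools, List.getElem_map, List.getElem_range]
  simp only [pvMaxRun, List.tail_cons, hcuts]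
  rw [pvChain_fold _ _ (by simp)]
  rw [e, pvChain_cuts]
  norm_num

theorem pvScan_eq (f : Int → Option String) (line : List String) (m : Nat) (acc : Int)
    (hm : 1 ≤ m) (hlen : line.length = m)
    (hf : ∀ k : Nat, k < m → f k = PySem.List.pyGet? line k) :
    max ((PySem.List.pyRange 1 (m : Int) 1).foldl
          (fun (s : Int × Int) x =>
            if f x == f (x - 1) then (s.1, s.2 + 1) else (max s.1 s.2, 1))
          (acc, 1)).1
        ((PySem.List.pyRange 1 (m : Int) 1).foldl
          (fun (s : Int × Int) x =>
            if f x == f (x - 1) then (s.1, s.2 + 1) else (max s.1 s.2, 1))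
          (acc, 1)).2
      = max acc (pvBest 1 (pvBools line)) := by
  have key : (PySem.List.pyRange 1 (m : Int) 1).foldl
        (fun (s : Int × Int) x =>
          if f x == f (x - 1) then (s.1, s.2 + 1) else (max s.1 s.2, 1)) (acc, 1)
      = (pvBools line).foldl pvStep (acc, 1) := by
    rw [PySem.List.pyRange_one]
    have e : ((m : Int) - 1).toNat = m - 1 := by omega
    rw [e, List.foldl_map]
    have hbools : pvBools line = (List.range (m - 1)).map
        (fun (k : Nat) => PySem.List.pyGet? line ((k : Int) + 1) == PySem.List.pyGet? line ((k : Nat) : Int)) := by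
      simp only [pvBools, hlen]
    rw [hbools, List.foldl_map]
    apply PySem.List.foldl_congr_mem
    intro s k hk
    have hk' : k < m - 1 := List.mem_range.mp hk
    have h1 : f (1 + (k : Int)) = PySem.List.pyGet? line ((k : Int) + 1) :=
      calc f (1 + (k : Int)) = f ((k + 1 : Nat) : Int) := by congr 1; push_cast; ring
        _ = PySem.List.pyGet? line ((k + 1 : Nat) : Int) := hf (k + 1) (by omega)
        _ = PySem.List.pyGet? line ((k : Int) + 1) := by norm_cast
    have h2 : f (1 + (k : Int) - 1) = PySem.List.pyGet? line (k : Int) := by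
      rw [show (1 : Int) + (k : Int) - 1 = (k : Int) by ring]
      exact hf k (by omega)
    rw [h1, h2]
    simp [pvStep]
  rw [key, pvStep_fold]

theorem pvFoldLines (L : List (List String)) (m : Nat) (g : Int → Int → Option String) (init : Int)
    (hm : 1 ≤ m) (hL : L.length = m) (hlines : ∀ l ∈ L, l.length = m)
    (hg : ∀ i : Int, 0 ≤ i → i < (m : Int) → ∀ k : Nat, k < m →
        g i (k : Int) = PySem.List.pyGet? (L.getD i.toNat []) (k : Int)) :
    (PySem.List.pyRange 0 (m : Int) 1).foldl
      (fun acc i =>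
        let p := (PySem.List.pyRange 1 (m : Int) 1).foldl
          (fun (s : Int × Int) x =>
            if g i x == g i (x - 1) then (s.1, s.2 + 1) else (max s.1 s.2, 1))
          (acc, 1)
        max p.1 p.2) init
    = (L.map (fun l => pvBest 1 (pvBools l))).foldl max init := by
  have main : (PySem.List.pyRange 0 (m : Int) 1).foldl
      (fun acc i =>
        let p := (PySem.List.pyRange 1 (m : Int) 1).foldl
          (fun (s : Int × Int) x =>
            if g i x == g i (x - 1) then (s.1, s.2 + 1) else (max s.1 s.2, 1))
          (acc, 1)
        max p.1 p.2) init
      = (PySem.List.pyRange 0 (m : Int) 1).foldl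
        (fun acc i => max acc (pvBest 1 (pvBools (PySem.List.pyGetD L i [])))) init := by
    apply PySem.List.foldl_congr_mem
    intro acc i hi
    obtain ⟨h0, h1⟩ := PySem.List.mem_pyRange_one.mp hi
    have hiN : i.toNat < L.length := by rw [hL]; omega
    have hld : PySem.List.pyGetD L i [] = L[i.toNat] :=
      PySem.List.pyGetD_eq_getElem L [] h0 (by rw [hL]; exact h1)
    have hlenl : (L[i.toNat]).length = m := hlines _ (List.getElem_mem hiN)
    have hf : ∀ k : Nat, k < m → g i (k : Int) = PySem.List.pyGet? (L[i.toNat]) (k : Int) := by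
      intro k hk
      rw [hg i h0 h1 k hk, List.getD_eq_getElem L [] hiN]
    have := pvScan_eq (g i) (L[i.toNat]) m acc hm hlenl hf
    rw [hld]
    exact this
  rw [main]
  have hL' : ((m : Nat) : Int) = ((L.length : Nat) : Int) := by rw [hL]
  rw [hL', PySem.List.foldl_pyRange_zero_pyGetD' L ([] : List String)
      (fun acc l => max acc (pvBest 1 (pvBools l))) init, List.foldl_map]

theorem cnt_candy_main (candy : List (List String)) (n : Int) (hn : 1 ≤ n)
    (hlen : n ≤ (candy.length : Int))
    (hrow : ∀ row ∈ candy.take n.toNat, n ≤ (row.length : Int)) :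
    cnt_candy candy n = cnt_candy_alt candy n := by
  obtain ⟨m, rfl⟩ : ∃ m : Nat, n = (m : Int) := ⟨n.toNat, by omega⟩
  have hm1 : 1 ≤ m := by exact_mod_cast hn
  have hlen' : m ≤ candy.length := by exact_mod_cast hlen
  have hrow' : ∀ row ∈ candy.take m, m ≤ row.length := by
    intro row hr
    have := hrow row (by simpa using hr)
    exact_mod_cast this
  set T := candy.take m with hTdef
  have hT : T.length = m := by simp [hTdef]; omega
  set grid := T.map (fun r => r.take m) with hgriddef
  set cols := (List.range m).map (fun j => grid.map (fun row => row.getD j "")) with hcolsdef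
  have hgridlen : grid.length = m := by simp [hgriddef, hT]
  have hgridlines : ∀ l ∈ grid, l.length = m := by
    intro l hl
    obtain ⟨s, hs, rfl⟩ := List.mem_map.mp hl
    have := hrow' s hs
    simp only [List.length_take]
    omega
  have hcolslen : cols.length = m := by simp [hcolsdef]
  have hcolslines : ∀ c ∈ cols, c.length = m := by
    intro c hc
    obtain ⟨j, hj, rfl⟩ := List.mem_map.mp hc
    simp [hgridlen]
  have hTi? : ∀ iN : Nat, iN < m → T[iN]? = some (candy.getD iN []) := by
    intro iN hiN
    have hic : iN < candy.length := lt_of_lt_of_le hiN hlen'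
    rw [hTdef, List.getElem?_take, if_pos hiN, List.getElem?_eq_getElem hic,
      List.getD_eq_getElem candy [] hic]
  have hclen : ∀ iN : Nat, iN < m → m ≤ (candy.getD iN []).length := by
    intro iN hiN
    exact hrow' _ (List.mem_iff_getElem?.mpr ⟨iN, hTi? iN hiN⟩)
  have hGi : ∀ iN : Nat, iN < m → grid.getD iN [] = (candy.getD iN []).take m := by
    intro iN hiN
    rw [List.getD_eq_getElem?_getD, hgriddef, List.getElem?_map, hTi? iN hiN,
      Option.map_some, Option.getD_some]
  have hpv : ∀ iN k : Nat, iN < m → k < m →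
      pvCell candy (iN : Int) (k : Int) = some ((candy.getD iN []).getD k "") := by
    intro iN k hiN hk
    have hic : iN < candy.length := lt_of_lt_of_le hiN hlen'
    have hklen : k < (candy.getD iN []).length := lt_of_lt_of_le hk (hclen iN hiN)
    show ((PySem.List.pyGet? candy ((iN : Nat) : Int)).bind
        (fun row => PySem.List.pyGet? row ((k : Nat) : Int))) = _
    rw [PySem.List.pyGet?_natCast, List.getElem?_eq_getElem hic, Option.bind_some,
      ← List.getD_eq_getElem candy [] hic, PySem.List.pyGet?_natCast,
      List.getElem?_eq_getElem hklen, List.getD_eq_getElem _ "" hklen]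
  have hgrow : ∀ i : Int, 0 ≤ i → i < (m : Int) → ∀ k : Nat, k < m →
      pvCell candy i (k : Int) = PySem.List.pyGet? (grid.getD i.toNat []) (k : Int) := by
    intro i h0 h1 k hk
    obtain ⟨iN, rfl⟩ : ∃ iN : Nat, i = (iN : Int) := ⟨i.toNat, by omega⟩
    have hiN : iN < m := by exact_mod_cast h1
    have hklen : k < (candy.getD iN []).length := lt_of_lt_of_le hk (hclen iN hiN)
    rw [Int.toNat_natCast, hpv iN k hiN hk, hGi iN hiN, PySem.List.pyGet?_natCast,
      List.getElem?_take, if_pos hk, List.getElem?_eq_getElem hklen,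
      List.getD_eq_getElem _ "" hklen]
  have hgcol : ∀ j : Int, 0 ≤ j → j < (m : Int) → ∀ k : Nat, k < m →
      pvCell candy (k : Int) j = PySem.List.pyGet? (cols.getD j.toNat []) (k : Int) := by
    intro j h0 h1 k hk
    obtain ⟨jN, rfl⟩ : ∃ jN : Nat, j = (jN : Int) := ⟨j.toNat, by omega⟩
    have hjN : jN < m := by exact_mod_cast h1
    have hkG : k < grid.length := by omega
    have hcj : cols.getD jN [] = grid.map (fun row => row.getD jN "") := by
      rw [List.getD_eq_getElem?_getD, hcolsdef, List.getElem?_map]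
      simp [hjN]
    have hjlen : jN < (candy.getD k []).length := lt_of_lt_of_le hjN (hclen k hk)
    rw [Int.toNat_natCast, hpv k jN hk hjN, hcj, PySem.List.pyGet?_natCast,
      List.getElem?_map, List.getElem?_eq_getElem hkG, Option.map_some,
      ← List.getD_eq_getElem grid [] hkG, hGi k hk,
      List.getD_eq_getElem _ "" (show jN < ((candy.getD k []).take m).length by
        simp only [List.length_take]; omega),
      List.getElem_take, List.getD_eq_getElem _ "" hjlen]
  have hrowfold : (PySem.List.pyRange 0 ((m : Nat) : Int) 1).foldl
      (fun max_candy i =>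
        let p := (PySem.List.pyRange 1 ((m : Nat) : Int) 1).foldl
          (fun (s : Int × Int) j =>
            if pvCell candy i j == pvCell candy i (j - 1) then (s.1, s.2 + 1)
            else (max s.1 s.2, 1)) (max_candy, 1)
        max p.1 p.2) 0
      = (grid.map (fun l => pvBest 1 (pvBools l))).foldl max 0 :=
    pvFoldLines grid m (fun i x => pvCell candy i x) 0 hm1 hgridlen hgridlines hgrow
  have hcolfold : (PySem.List.pyRange 0 ((m : Nat) : Int) 1).foldl
      (fun max_candy j =>
        let p := (PySem.List.pyRange 1 ((m : Nat) : Int) 1).foldl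
          (fun (s : Int × Int) i =>
            if pvCell candy i j == pvCell candy (i - 1) j then (s.1, s.2 + 1)
            else (max s.1 s.2, 1)) (max_candy, 1)
        max p.1 p.2) ((grid.map (fun l => pvBest 1 (pvBools l))).foldl max 0)
      = (cols.map (fun l => pvBest 1 (pvBools l))).foldl max
          ((grid.map (fun l => pvBest 1 (pvBools l))).foldl max 0) :=
    pvFoldLines cols m (fun j x => pvCell candy x j)
      ((grid.map (fun l => pvBest 1 (pvBools l))).foldl max 0) hm1 hcolslen hcolslines hgcol
  have hA : cnt_candy candy ((m : Nat) : Int)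
      = ((grid.map (fun l => pvBest 1 (pvBools l)))
          ++ (cols.map (fun l => pvBest 1 (pvBools l)))).foldl max 0 := by
    rw [List.foldl_append]
    calc cnt_candy candy ((m : Nat) : Int)
        = (PySem.List.pyRange 0 ((m : Nat) : Int) 1).foldl
            (fun max_candy j =>
              let p := (PySem.List.pyRange 1 ((m : Nat) : Int) 1).foldl
                (fun (s : Int × Int) i =>
                  if pvCell candy i j == pvCell candy (i - 1) j then (s.1, s.2 + 1)
                  else (max s.1 s.2, 1)) (max_candy, 1)
              max p.1 p.2)
            ((PySem.List.pyRange 0 ((m : Nat) : Int) 1).foldl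
              (fun max_candy i =>
                let p := (PySem.List.pyRange 1 ((m : Nat) : Int) 1).foldl
                  (fun (s : Int × Int) j =>
                    if pvCell candy i j == pvCell candy i (j - 1) then (s.1, s.2 + 1)
                    else (max s.1 s.2, 1)) (max_candy, 1)
                max p.1 p.2) 0) := rfl
      _ = _ := by rw [hrowfold]; exact hcolfold
  have hBgrid : (PySem.List.slice candy none (some (max ((m : Nat) : Int) 0))).map
      (fun row => PySem.List.slice row none (some (max ((m : Nat) : Int) 0))) = grid := by
    have hmax : max ((m : Nat) : Int) 0 = ((m : Nat) : Int) := max_eq_left (by positivity)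
    rw [hmax, PySem.List.slice_to candy (b := ((m : Nat) : Int)) (by positivity),
      Int.toNat_natCast, ← hTdef, hgriddef]
    apply List.map_congr_left
    intro r hr
    rw [PySem.List.slice_to r (b := ((m : Nat) : Int)) (by positivity), Int.toNat_natCast]
  have hreplen : grid.map List.length = List.replicate m m := by
    rw [List.eq_replicate_iff]
    refine ⟨by simp [hgridlen], ?_⟩
    intro b hb
    obtain ⟨l, hl, rfl⟩ := List.mem_map.mp hb
    exact hgridlines l hl
  have hminlen : ((grid.map List.length).min?).getD 0 = m := by
    obtain ⟨m', hm'⟩ : ∃ m', m = m' + 1 := ⟨m - 1, by omega⟩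
    rw [hreplen, hm', pvMin?_replicate]
    rfl
  have hB : cnt_candy_alt candy ((m : Nat) : Int)
      = match (grid ++ cols).map pvMaxRun with
        | [] => (0 : Int)
        | v :: vs => vs.foldl max v := by
    simp only [cnt_candy_alt]
    rw [hBgrid, hminlen, ← hcolsdef]
  have hmapeq : (grid ++ cols).map pvMaxRun
      = (grid.map (fun l => pvBest 1 (pvBools l)))
        ++ (cols.map (fun l => pvBest 1 (pvBools l))) := by
    rw [List.map_append]
    congr 1
    · apply List.map_congr_left
      intro l hl
      have hlm := hgridlines l hl
      exact pvMaxRun_eq l (by intro hnil; rw [hnil] at hlm; simp at hlm; omega)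
    · apply List.map_congr_left
      intro c hc
      have hcm := hcolslines c hc
      exact pvMaxRun_eq c (by intro hnil; rw [hnil] at hcm; simp at hcm; omega)
  have hgne : grid ≠ [] := by
    intro h
    rw [h] at hgridlen
    simp at hgridlen
    omega
  obtain ⟨l0, rest, hge⟩ := List.exists_cons_of_ne_nil hgne
  rw [hA, hB, hmapeq, hge]
  simp only [List.map_cons, List.cons_append]
  show List.foldl max (max 0 (pvBest 1 (pvBools l0)))
        ((rest.map (fun l => pvBest 1 (pvBools l)))
          ++ (cols.map (fun l => pvBest 1 (pvBools l))))
      = List.foldl max (pvBest 1 (pvBools l0))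
        ((rest.map (fun l => pvBest 1 (pvBools l)))
          ++ (cols.map (fun l => pvBest 1 (pvBools l))))
  have hv1 : (0 : Int) ≤ pvBest 1 (pvBools l0) := le_trans (by omega) (pvBest_ge _ 1)
  rw [max_eq_right hv1]

-- ===== VERDICT (by name: the statement is the Claim_ definition above) =====
theorem cnt_candy_spec : Claim_unchanged_cnt_candy := by
  intro candy n hdom hpre hnd
  show cnt_candy candy n = cnt_candy_alt candy n
  by_cases hn0 : n ≤ 0
  · have hA : cnt_candy candy n = 0 := by
      simp [cnt_candy, PySem.List.pyRange_one_eq_nil (a := 0) hn0]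
    have hB : cnt_candy_alt candy n = 0 := by
      simp [cnt_candy_alt, max_eq_right hn0, PySem.List.slice_to candy (le_refl (0 : Int))]
    rw [hA, hB]
  · rcases hpre with hle | ⟨hlen, hrow⟩
    · have hn1 : n = 1 := by omega
      subst hn1
      have hh : candy.head?.getD [] ≠ [] := by simpa [D_cnt_candy] using hnd
      cases candy with
      | nil => simp at hh
      | cons r t =>
        have hr : r ≠ [] := by simpa using hh
        apply cnt_candy_main
        · omega
        · push_cast [List.length_cons]
          omega
        · intro row hrow
          have hrr : row = r := by
            rw [show (1 : Int).toNat = 1 from rfl] at hrow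
            simpa using hrow
          subst hrr
          have := List.length_pos_of_ne_nil hr
          omega
    · exact cnt_candy_main candy n (by omega) hlen hrow

theorem cnt_candy_changed : Claim_changed_cnt_candy := by
  unfold Claim_changed_cnt_candy; decide

theorem cnt_candy_tight : Claim_exact_cnt_candy := by
  intro candy n hdom hpre hd
  obtain ⟨hn1, hhead⟩ := hd
  subst hn1
  have hA : cnt_candy candy 1 = 1 := by
    have h01 : PySem.List.pyRange 0 1 1 = [0] := by decide
    have h11 : PySem.List.pyRange 1 1 1 = [] := by decide
    simp [cnt_candy, h01, h11]
  have hB : cnt_candy_alt candy 1 = 0 := by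
    cases candy with
    | nil => decide
    | cons r t =>
      have hr : r = [] := by simpa using hhead
      subst hr
      simp [cnt_candy_alt, PySem.List.slice_to ([] :: t : List (List String)) (by norm_num : (0 : Int) ≤ 1),
        PySem.List.slice_to ([] : List String) (by norm_num : (0 : Int) ≤ 1),
        show pvMaxRun ([] : List String) = 0 from by decide,
        show (List.min? [(0 : Nat)]) = some 0 from by decide]
  rw [hA, hB]
  omega
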